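-- pv_equiv track=rewrite | github.com/florisvdf/chargenet | src/chargenet/utils/utils.py | determine_offset
-- ===== SOURCE A (Python) =====
-- from collections import Counter, defaultdict
--
-- def determine_offset(residue_positions_a: dict, residue_positions_b: dict):
--     matching_pairs = []
--     for idx_a, char_a in residue_positions_a.items():
--         for idx_b, char_b in residue_positions_b.items():
--             if char_a == char_b:
--                 matching_pairs.append((idx_a, idx_b))
--     offsets = defaultdict(int)
--     for idx_a, idx_b in matching_pairs:
--         offset = idx_a - idx_b
--         offsets[offset] += 1
--     if offsets:
--         most_frequent_offset = max(offsets, key=offsets.get)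
--         return most_frequent_offset
--     else:
--         return None
-- ===== SOURCE B (Python) =====
-- def determine_offset(residue_positions_a: dict, residue_positions_b: dict):
--     index = {}
--     for idx_b, char_b in residue_positions_b.items():
--         index.setdefault(char_b, []).append(idx_b)
--     offsets = {}
--     for idx_a, char_a in residue_positions_a.items():
--         for idx_b in index.get(char_a, ()):
--             d = idx_a - idx_b
--             offsets[d] = offsets.get(d, 0) + 1
--     best = None
--     best_count = 0
--     for off, cnt in offsets.items():
--         if best_count < cnt:
--             best, best_count = off, cnt
--     return best
-- ===== Notes on version B (the rewrite author's own statement) =====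
-- stated objective: faster
-- what changed: B builds a char-to-positions index over residue_positions_b once and counts offsets in one indexed pass over residue_positions_a (instead of A's all-pairs scan materialising a pairs list and counting it in a second pass), and selects the winner with a single explicit best/best_count scan instead of max(offsets, key=offsets.get).
import Mathlib
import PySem

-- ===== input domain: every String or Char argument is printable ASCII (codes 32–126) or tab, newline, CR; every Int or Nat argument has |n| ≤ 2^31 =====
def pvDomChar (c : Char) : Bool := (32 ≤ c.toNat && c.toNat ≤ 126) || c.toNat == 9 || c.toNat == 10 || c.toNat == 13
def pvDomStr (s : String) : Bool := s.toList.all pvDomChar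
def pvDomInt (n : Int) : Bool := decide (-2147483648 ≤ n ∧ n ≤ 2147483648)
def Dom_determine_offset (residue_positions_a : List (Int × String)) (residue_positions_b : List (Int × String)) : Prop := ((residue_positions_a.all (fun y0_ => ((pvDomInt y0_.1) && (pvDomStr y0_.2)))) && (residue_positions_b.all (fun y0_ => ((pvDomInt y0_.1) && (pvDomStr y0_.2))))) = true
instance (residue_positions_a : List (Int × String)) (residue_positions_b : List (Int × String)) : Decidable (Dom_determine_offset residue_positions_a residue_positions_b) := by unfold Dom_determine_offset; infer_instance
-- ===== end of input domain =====

-- B replaces A's all-pairs pair-list scan by a char→positions index over B built once, one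
-- indexed counting pass over A, and an explicit best/best_count argmax scan (objective: faster).

-- ===== PORT A =====
def determine_offset (residue_positions_a : List (Int × String)) (residue_positions_b : List (Int × String)) : Option Int :=
  let items_a := (PySem.Dict.ofList residue_positions_a).items
  let items_b := (PySem.Dict.ofList residue_positions_b).items
  let matching_pairs : List (Int × Int) :=
    items_a.foldl (fun acc p =>
      items_b.foldl (fun acc q =>
        if p.2 == q.2 then acc ++ [(p.1, q.1)] else acc) acc) []
  let offsets : PySem.Dict Int Int :=
    matching_pairs.foldl (fun d pr => d.modify (pr.1 - pr.2) 0 (· + 1)) PySem.Dict.empty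
  if offsets.items.isEmpty then none
  else PySem.List.max? offsets.keys (fun k => offsets.getD k 0)

-- ===== PORT B =====
def determine_offset_alt (residue_positions_a : List (Int × String)) (residue_positions_b : List (Int × String)) : Option Int :=
  let index : PySem.Dict String (List Int) :=
    (PySem.Dict.ofList residue_positions_b).items.foldl
      (fun d q => d.modify q.2 [] (· ++ [q.1])) PySem.Dict.empty
  let offsets : PySem.Dict Int Int :=
    (PySem.Dict.ofList residue_positions_a).items.foldl
      (fun d p => (index.getD p.2 []).foldl
        (fun d ib => d.insert (p.1 - ib) (d.getD (p.1 - ib) 0 + 1)) d) PySem.Dict.empty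
  (offsets.items.foldl
    (fun acc pr => if acc.2 < pr.2 then (some pr.1, pr.2) else acc)
    ((none : Option Int), (0 : Int))).1

-- ===== PRECONDITION & SPEC =====
def Spec_determine_offset (residue_positions_a : List (Int × String)) (residue_positions_b : List (Int × String)) (out : Option Int) : Prop := out = determine_offset_alt residue_positions_a residue_positions_b
instance (residue_positions_a : List (Int × String)) (residue_positions_b : List (Int × String)) (out : Option Int) : Decidable (Spec_determine_offset residue_positions_a residue_positions_b out) := by unfold Spec_determine_offset; infer_instance

-- ===== CLAIM (what is proved, stated in full; the proofs are below) =====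
def Claim_equal_determine_offset : Prop := ∀ (residue_positions_a : List (Int × String)) (residue_positions_b : List (Int × String)), Dom_determine_offset residue_positions_a residue_positions_b → Spec_determine_offset residue_positions_a residue_positions_b (determine_offset residue_positions_a residue_positions_b)

-- ===== LEMMAS AND PROOFS =====

-- A's matching_pairs nested loop is the flatMap of per-row filtered matches.
theorem pairs_eq_flatMap (da db : List (Int × String)) :
    da.foldl (fun acc p => db.foldl (fun acc q =>
        if p.2 == q.2 then acc ++ [(p.1, q.1)] else acc) acc) ([] : List (Int × Int)) =
    da.flatMap (fun p => (db.filter (fun q => p.2 == q.2)).map (fun q => (p.1, q.1))) := by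
  calc da.foldl (fun acc p => db.foldl (fun acc q =>
          if p.2 == q.2 then acc ++ [(p.1, q.1)] else acc) acc) []
      = da.foldl (fun acc p => acc ++ (db.filter (fun q => p.2 == q.2)).map (fun q => (p.1, q.1))) [] := by
        apply PySem.List.foldl_congr_mem
        intro acc p _
        exact PySem.List.foldl_append_if (fun q => p.2 == q.2) (fun q => (p.1, q.1)) db acc
    _ = _ := by
        rw [PySem.List.foldl_append_eq_flatMap]
        simp

-- B's grouping index looked up at a character is the filtered positions of db in order.
theorem index_getD (db : List (Int × String)) (c : String) :
    (db.foldl (fun d q => d.modify q.2 [] (· ++ [q.1])) (PySem.Dict.empty : PySem.Dict String (List Int))).getD c [] =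
    (db.filter (fun q => q.2 == c)).map (fun q => q.1) := by
  have hmap : db.foldl (fun d q => d.modify q.2 [] (· ++ [q.1])) (PySem.Dict.empty : PySem.Dict String (List Int)) =
      (db.map (fun q => (q.2, q.1))).foldl (fun d p => d.modify p.1 [] (· ++ [p.2])) PySem.Dict.empty := by
    rw [List.foldl_map]
  rw [hmap, PySem.Dict.getD_foldl_modify_append]
  simp [List.filter_map, List.map_map, Function.comp_def]

-- A's offset counter is the Counter of the flat offset list.
theorem offsetsA_eq_counter (da db : List (Int × String)) :
    ((da.foldl (fun acc p => db.foldl (fun acc q =>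
        if p.2 == q.2 then acc ++ [(p.1, q.1)] else acc) acc) ([] : List (Int × Int))).foldl
      (fun d pr => d.modify (pr.1 - pr.2) 0 (· + 1)) (PySem.Dict.empty : PySem.Dict Int Int)) =
    PySem.Dict.counter (da.flatMap (fun p => (db.filter (fun q => p.2 == q.2)).map (fun q => p.1 - q.1))) := by
  rw [pairs_eq_flatMap, PySem.Dict.counter_eq_foldl]
  rw [show (da.flatMap (fun p => (db.filter (fun q => p.2 == q.2)).map (fun q => p.1 - q.1)))
      = (da.flatMap (fun p => (db.filter (fun q => p.2 == q.2)).map (fun q => (p.1, q.1)))).map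
          (fun pr : Int × Int => pr.1 - pr.2) from by
    simp [List.map_flatMap, List.map_map, Function.comp_def]]
  rw [List.foldl_map]

-- B's offset counter is the Counter of the same flat offset list.
theorem offsetsB_eq_counter (da db : List (Int × String)) :
    (da.foldl (fun d p =>
      (((db.foldl (fun d q => d.modify q.2 [] (· ++ [q.1])) (PySem.Dict.empty : PySem.Dict String (List Int))).getD p.2 [])).foldl
        (fun d ib => d.insert (p.1 - ib) (d.getD (p.1 - ib) 0 + 1)) d) PySem.Dict.empty) =
    PySem.Dict.counter (da.flatMap (fun p => (db.filter (fun q => p.2 == q.2)).map (fun q => p.1 - q.1))) := by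
  rw [← PySem.Dict.foldl_insert_getD_add_one_eq_counter, List.foldl_flatMap]
  apply PySem.List.foldl_congr_mem
  intro d p _
  rw [index_getD db p.2, List.foldl_map, List.foldl_map]
  have : db.filter (fun q => p.2 == q.2) = db.filter (fun q => q.2 == p.2) := by
    apply List.filter_congr
    intro q _
    simp [eq_comm]
  rw [this]

-- The pair-state argmax fold started at a seen element tracks max?'s Option fold.
theorem fold_pair (g : Int → Int) :
    ∀ (ks : List Int) (m : Int),
    ks.foldl (fun acc k => if acc.2 < g k then (some k, g k) else acc) (some m, g m)
    = (PySem.List.max? (m :: ks) g, g ((PySem.List.max? (m :: ks) g).getD 0)) := by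
  intro ks
  induction ks with
  | nil => intro m; simp [PySem.List.max?]
  | cons k t ih =>
    intro m
    simp only [PySem.List.max?, List.foldl_cons] at *
    by_cases h : g m < g k
    · simp only [h, if_true]
      exact ih k
    · simp only [h, if_false]
      exact ih m

-- The explicit best/best_count scan over (key, positive count) pairs is Python's max(…, key=…),
-- with none exactly on the empty dict.
theorem sel_eq_max? (g : Int → Int) (ks : List Int) (hpos : ∀ k ∈ ks, 1 ≤ g k) :
    ((ks.map (fun k => (k, g k))).foldl
      (fun acc pr => if acc.2 < pr.2 then (some pr.1, pr.2) else acc)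
      ((none : Option Int), (0 : Int))).1
    = if ks.isEmpty then none else PySem.List.max? ks g := by
  cases ks with
  | nil => simp
  | cons k t =>
    have hk : (0 : Int) < g k := by
      have := hpos k (by simp)
      omega
    simp only [List.map_cons, List.foldl_cons, List.isEmpty_cons, Bool.false_eq_true, if_false,
      hk, if_true]
    rw [List.foldl_map, fold_pair g t k]

-- Every count in a Counter of a list is at least 1 on its keys.
theorem counter_pos (L : List Int) : ∀ k ∈ (PySem.Dict.counter L).keys, 1 ≤ (PySem.Dict.counter L).getD k 0 := by
  intro k hk
  rw [PySem.Dict.keys_counter] at hk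
  have hmem : k ∈ L := (PySem.Set.mem_ofList _ _).1 hk
  rw [PySem.Dict.getD_counter]
  have := List.count_pos_iff.2 hmem
  omega

-- The two tails agree on any Counter dict.
theorem tails_eq (L : List Int) :
    ((PySem.Dict.counter L).items.foldl
      (fun acc pr => if acc.2 < pr.2 then (some pr.1, pr.2) else acc)
      ((none : Option Int), (0 : Int))).1
    = if (PySem.Dict.counter L).items.isEmpty then none
      else PySem.List.max? (PySem.Dict.counter L).keys (fun k => (PySem.Dict.counter L).getD k 0) := by
  have hnd : (PySem.Dict.counter L).keys.Nodup := PySem.Dict.nodup_keys_counter L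
  have hitems := PySem.Dict.items_eq_map_keys (PySem.Dict.counter L) hnd (0 : Int)
  rw [hitems, sel_eq_max? _ _ (counter_pos L)]
  congr 1
  simp [PySem.Dict.keys]

theorem determine_offset_spec : Claim_equal_determine_offset := by
  intro a b _
  unfold Spec_determine_offset determine_offset determine_offset_alt
  simp only []
  rw [offsetsA_eq_counter, offsetsB_eq_counter, tails_eq]
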